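-- pv_equiv track=rewrite | github.com/WithoutHaste/RecreationalMath | pythonGenerators/generate_partitions.py | generate_partitions
-- ===== SOURCE A (Python) =====
-- def generate_partitions(max):
-- 	""" Returns an array of partition numbers from 1 to max """
--
-- 	if max <= 0:
-- 		raise Exception('generate_partitions requires a positive integer')
--
-- 	is_partition = []
-- 	for n in range(max+1):
-- 		if n < 1:
-- 			continue
-- 		number_of_ways = number_of_ways_n_can_be_partitioned(n)
-- 		if number_of_ways > max:
-- 			break
-- 		is_partition.append(number_of_ways)
--
-- 	return is_partition
--
-- def number_of_ways_n_can_be_partitioned(n):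
-- 	"""
-- 	can I linearly iterate through all unique possible partitions?
-- 	n = 4, elements = a,a,a,a
-- 	partitions:
-- 	all separate a,a,a,a
-- 	two together (a,a),a,a | (a,a),(a,a)
-- 	three together (a,a,a),a
-- 	all together (a,a,a,a)
--
-- 	since all elements are identical, i don't need to worry about reordering them
-- 	and the sets cannot be nested
-- 	so i just need to place a series of delimiters into the array
--
-- 	could think of this as n = 4
-- 	how many ways can integers sum to 4?
-- 	1+1+1+1 = 4
-- 	1+3 = 3+1 = 4
-- 	2+2 = 4
-- 	1+1+2  = 1+2+1 = 2+1+1 = 4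
-- 	4 = 4
-- 	YES!
-- 	how many sets of non-distinct integers (1 to N) sum to N?
-- 	"""
-- 	# one_to_n=[1,2,3] and factors=[0,2,1] means 1*0 + 2*2 + 3*1
-- 	one_to_n = [x+1 for x in range(n)]
-- 	factors = [0] * len(one_to_n)
-- 	number_of_partitions = 0
-- 	while increment_factors(n, factors, one_to_n):
-- 		total = apply_factors_to_ints(factors, one_to_n)
-- 		if total == n:
-- 			number_of_partitions = number_of_partitions + 1
-- 	return number_of_partitions
--
-- def apply_factors_to_ints(factors, ints):
-- 	total = 0
-- 	for i in range(len(factors)):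
-- 		total = total + (factors[i] * ints[i])
-- 	return total
--
-- def increment_factors(n, factors, ints):
-- 	""" Assumes largest int corresponds to last factor in list """
-- 	""" Therefore, will return False when last factor becomes too large for n, to indicate we can't increment further """
-- 	increment_factor_at_i(0, n, factors, ints)
-- 	total = apply_factors_to_ints(factors, ints)
-- 	return total != 0 # equals 0 when we loop back around to the beginning
--
-- def increment_factor_at_i(i, n, factors, ints):
-- 	""" Algorithm: operates left to right, incrementing one factor until the resulting total is greater than n """
-- 	if i >= len(factors):
-- 		return
-- 	factors[i] = factors[i] + 1
-- 	total = apply_factors_to_ints(factors, ints)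
-- 	if total > n:
-- 		factors[i] = 0
-- 		increment_factor_at_i(i+1, n, factors, ints)
-- ===== SOURCE B (Python) =====
-- def generate_partitions(max):
-- 	""" Returns an array of partition numbers from 1 to max """
--
-- 	if max <= 0:
-- 		raise Exception('generate_partitions requires a positive integer')
--
-- 	result = []
-- 	n = 1
-- 	while n <= max:
-- 		p = count_partitions(n)
-- 		if p > max:
-- 			break
-- 		result.append(p)
-- 		n = n + 1
-- 	return result
--
-- def count_partitions(n):
-- 	""" p(n) by the bounded-part DP: ways[j] = number of partitions of j into parts <= k """
-- 	ways = [0] * (n + 1)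
-- 	ways[0] = 1
-- 	for k in range(1, n + 1):
-- 		for j in range(k, n + 1):
-- 			ways[j] = ways[j] + ways[j - k]
-- 	return ways[n]
-- ===== Notes on version B (the rewrite author's own statement) =====
-- stated objective: faster
-- what changed: A counts the partitions of each n by running an odometer over all factor vectors (f_1..f_n) with sum f_i*i <= n and counting those that hit n exactly (time proportional to the sum of all partition numbers up to n, per n); B computes p(n) with the classic bounded-part dynamic-programming table ways[j] += ways[j-k], O(n^2) per n.
import Mathlib
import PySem

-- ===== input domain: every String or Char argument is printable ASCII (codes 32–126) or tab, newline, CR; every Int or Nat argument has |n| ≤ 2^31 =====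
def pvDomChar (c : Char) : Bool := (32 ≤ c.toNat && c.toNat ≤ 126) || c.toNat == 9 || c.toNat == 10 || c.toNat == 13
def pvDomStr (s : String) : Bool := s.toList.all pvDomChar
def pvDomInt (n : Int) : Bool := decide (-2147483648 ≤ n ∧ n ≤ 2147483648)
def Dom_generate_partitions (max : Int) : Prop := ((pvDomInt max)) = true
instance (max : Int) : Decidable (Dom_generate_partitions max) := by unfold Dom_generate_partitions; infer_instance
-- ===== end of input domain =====

-- B replaces A's odometer enumeration of all factor vectors by the bounded-part
-- partition DP table, which a timing run measured as much faster.

-- ===== PORT A =====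

-- apply_factors_to_ints(factors, ints)
def applyFactors (factors ints : List Int) : Int :=
  (PySem.List.pyRange 0 (factors.length : Int) 1).foldl
    (fun total i => total + PySem.List.pyGetD factors i 0 * PySem.List.pyGetD ints i 0) 0

-- increment_factor_at_i(i, n, factors, ints); Python only calls it with i = 0, i+1,
-- so the index is a Nat; mutation of `factors` is returned as the new list.
def incrementFactorAtI (i : Nat) (n : Int) (factors ints : List Int) : List Int :=
  if i ≥ factors.length then factors
  else
    let f1 := factors.set i (PySem.List.pyGetD factors (i : Int) 0 + 1)
    if applyFactors f1 ints > n then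
      incrementFactorAtI (i+1) n (f1.set i 0) ints
    else f1
termination_by factors.length - i
decreasing_by simp_all [List.length_set]; omega

-- increment_factors(n, factors, ints): returns (new factors, the bool Python returns)
def incrementFactors (n : Int) (factors ints : List Int) : List Int × Bool :=
  let f1 := incrementFactorAtI 0 n factors ints
  (f1, applyFactors f1 ints != 0)

-- the 'while increment_factors(...)' loop of number_of_ways_n_can_be_partitioned;
-- the fuel only makes the recursion total, it is proved never to run out
def nwLoop (fuel : Nat) (n : Int) (factors ints : List Int) (count : Int) : Int :=
  match fuel with
  | 0 => count
  | fuel + 1 =>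
    let p := incrementFactors n factors ints
    if p.2 then
      let total := applyFactors p.1 ints
      nwLoop fuel n p.1 ints (if total == n then count + 1 else count)
    else count

-- number_of_ways_n_can_be_partitioned(n)
def numberOfWays (n : Int) : Int :=
  let one_to_n := (PySem.List.pyRange 0 n 1).map (fun x => x + 1)
  let factors := List.replicate one_to_n.length (0 : Int)
  nwLoop ((n.toNat + 1) ^ n.toNat + 1) n factors one_to_n 0

-- the 'for n in range(max+1)' loop with its 'continue' and 'break'
def gpLoop (ns : List Int) (max : Int) (acc : List Int) : List Int :=
  match ns with
  | [] => acc
  | n :: rest =>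
    if n < 1 then gpLoop rest max acc
    else
      let w := numberOfWays n
      if w > max then acc
      else gpLoop rest max (acc ++ [w])

def generate_partitions (max : Int) : List Int :=
  if max ≤ 0 then []   -- Python raises here; excluded by Pre_
  else gpLoop (PySem.List.pyRange 0 (max + 1) 1) max []

-- ===== PORT B =====

-- count_partitions(n): ways[j] = number of partitions of j into parts ≤ k
def countPartitions (n : Int) : Int :=
  let ways0 := PySem.List.pySetD (List.replicate (n + 1).toNat (0 : Int)) 0 1
  let ways := (PySem.List.pyRange 1 (n + 1) 1).foldl (fun ways k =>
    (PySem.List.pyRange k (n + 1) 1).foldl (fun ways j =>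
      PySem.List.pySetD ways j
        (PySem.List.pyGetD ways j 0 + PySem.List.pyGetD ways (j - k) 0)) ways) ways0
  PySem.List.pyGetD ways n 0

-- the 'while n <= max' loop of B
def gpAltLoop (n max : Int) (acc : List Int) : List Int :=
  if n ≤ max then
    let p := countPartitions n
    if p > max then acc
    else gpAltLoop (n + 1) max (acc ++ [p])
  else acc
termination_by (max + 1 - n).toNat
decreasing_by omega

def generate_partitions_alt (max : Int) : List Int :=
  if max ≤ 0 then []   -- Python raises here; excluded by Pre_
  else gpAltLoop 1 max []

-- ===== PRECONDITION & SPEC =====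
-- Pre_ excludes exactly max ≤ 0, on which the Python A raises an Exception.
def Pre_generate_partitions (max : Int) : Prop := 0 < max
instance (max : Int) : Decidable (Pre_generate_partitions max) := by unfold Pre_generate_partitions; infer_instance
def pvWitness_generate_partitions : Int := (5)

def Spec_generate_partitions (max : Int) (out : List Int) : Prop := out = generate_partitions_alt max
instance (max : Int) (out : List Int) : Decidable (Spec_generate_partitions max out) := by unfold Spec_generate_partitions; infer_instance

-- ===== CLAIM (what is proved, stated in full; the proofs are below) =====
def Claim_equal_generate_partitions : Prop := ∀ (max : Int), Dom_generate_partitions max → Pre_generate_partitions max → Spec_generate_partitions max (generate_partitions max)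

-- ===== LEMMAS AND PROOFS =====

-- weighted sum with weights w, w+1, … : the mathematical value of apply_factors_to_ints
def wsumFrom (w : Int) : List Int → Int
  | [] => 0
  | x :: xs => x * w + wsumFrom (w + 1) xs

-- number of partitions of b into parts ≤ k (the common spec of both programs)
def specW : Nat → Nat → Nat
  | 0, b => if b = 0 then 1 else 0
  | k + 1, b => specW k b + if b ≥ k + 1 then specW (k + 1) (b - (k + 1)) else 0
termination_by k b => (k, b)
decreasing_by all_goals simp_wf; omega

-- all factor vectors of length w (weights 1..w) with weighted sum ≤ b, in the
-- colex order in which A's odometer visits them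
def colexEnum : Nat → Nat → List (List Int)
  | 0, _ => [[]]
  | w + 1, b => (List.range (b / (w + 1) + 1)).flatMap
      (fun t => (colexEnum w (b - t * (w + 1))).map (fun f => f ++ [(t : Int)]))


theorem wsum_append (xs ys : List Int) (w : Int) :
    wsumFrom w (xs ++ ys) = wsumFrom w xs + wsumFrom (w + xs.length) ys := by
  induction xs generalizing w with
  | nil => simp [wsumFrom]
  | cons x xs ih =>
    simp only [List.cons_append, wsumFrom, ih (w+1), List.length_cons]
    push_cast; ring_nf

theorem wsum_replicate_zero (m : Nat) (w : Int) : wsumFrom w (List.replicate m 0) = 0 := by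
  induction m generalizing w with
  | zero => simp [wsumFrom]
  | succ m ih => simp [List.replicate_succ, wsumFrom, ih]

theorem wsum_set (L : List Int) (i : Nat) (x : Int) (w : Int) (h : i < L.length) :
    wsumFrom w (L.set i x) = wsumFrom w L + (x - L.getD i 0) * (w + i) := by
  induction L generalizing i w with
  | nil => simp at h
  | cons a L ih =>
    cases i with
    | zero => simp only [List.set_cons_zero, wsumFrom, List.getD_cons_zero]; ring
    | succ i =>
      simp only [List.set_cons_succ, wsumFrom, List.getD_cons_succ]
      rw [ih i (w+1) (by simpa using h)]
      push_cast; ring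

def oneToN (n : Int) : List Int := (PySem.List.pyRange 0 n 1).map (fun x => x + 1)

theorem length_oneToN (n : Int) : (oneToN n).length = n.toNat := by
  simp [oneToN, PySem.List.length_pyRange_one]

theorem applyFactors_eq (n : Int) (f : List Int) (hf : f.length = n.toNat) :
    applyFactors f (oneToN n) = wsumFrom 1 f := by
  unfold applyFactors
  rw [PySem.List.pyRange_zero, Int.toNat_natCast, List.foldl_map]
  have key : ∀ (k : Nat), k ≤ f.length →
      (List.range k).foldl (fun (t : Int) (i : Nat) => t + PySem.List.pyGetD f (i : Int) 0 *
        PySem.List.pyGetD (oneToN n) (i : Int) 0) 0 = wsumFrom 1 (f.take k) := by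
    intro k hk
    induction k with
    | zero => simp [wsumFrom]
    | succ k ih =>
      rw [List.range_succ, List.foldl_append, ih (by omega), List.foldl_cons, List.foldl_nil]
      have hkl : k < f.length := by omega
      have h1 : PySem.List.pyGetD f (k : Int) 0 = f[k] := by
        simp [PySem.List.pyGetD_natCast, List.getD_eq_getElem?_getD, hkl]
      have h2 : PySem.List.pyGetD (oneToN n) (k : Int) 0 = (k : Int) + 1 := by
        unfold oneToN
        rw [PySem.List.pyGetD_map_pyRange_of_nonneg (fun x => x + 1) n (k : Int) 0 (by omega)
          (by omega : (k:Int) < n)]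
      have h3 : wsumFrom 1 (f.take (k+1)) = wsumFrom 1 (f.take k) + f[k] * (1 + (k:Int)) := by
        rw [List.take_add_one, List.getElem?_eq_getElem hkl]
        simp only [Option.toList_some]
        rw [wsum_append]
        simp [List.length_take, Nat.min_eq_left (by omega : k ≤ f.length), wsumFrom]
      rw [h1, h2, h3]; ring
  have := key f.length le_rfl
  simpa using this

theorem colex_head (w b : Nat) : (colexEnum w b).head? = some (List.replicate w (0:Int)) := by
  induction w generalizing b with
  | zero => simp [colexEnum]
  | succ w ih =>
    rw [colexEnum, List.range_succ_eq_map, List.flatMap_cons, List.head?_append, List.head?_map]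
    simp [ih, List.replicate_succ' (n := w)]

theorem colex_ne_nil (w b : Nat) : colexEnum w b ≠ [] := by
  intro h
  have := colex_head w b
  rw [h] at this; simp at this

theorem mem_colex {w b : Nat} {f : List Int} (hf : f ∈ colexEnum w b) :
    f.length = w ∧ 0 ≤ wsumFrom 1 f ∧ wsumFrom 1 f ≤ (b : Int) := by
  induction w generalizing b f with
  | zero =>
    simp [colexEnum] at hf
    subst hf; simp [wsumFrom]
  | succ w ih =>
    rw [colexEnum, List.mem_flatMap] at hf
    obtain ⟨t, ht, hf⟩ := hf
    rw [List.mem_map] at hf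
    obtain ⟨f', hf', rfl⟩ := hf
    obtain ⟨hl, h0, hub⟩ := ih hf'
    have htM : t * (w + 1) ≤ b := by
      rw [List.mem_range] at ht
      have : t ≤ b / (w+1) := by omega
      exact (Nat.le_div_iff_mul_le (by omega)).1 this
    have hcast : ((b - t * (w+1) : Nat) : Int) = (b : Int) - (t : Int) * ((w : Int) + 1) := by
      push_cast [htM]; ring
    rw [hcast] at hub
    have hw : wsumFrom 1 (f' ++ [(t : Int)]) = wsumFrom 1 f' + (t : Int) * ((w : Int) + 1) := by
      rw [wsum_append, hl]; simp only [wsumFrom]; ring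
    refine ⟨by simp [hl], ?_, ?_⟩
    · rw [hw]; positivity
    · rw [hw]; linarith

theorem colex_tail_pos {w b : Nat} {g : List Int} (hg : g ∈ (colexEnum w b).tail) :
    0 < wsumFrom 1 g := by
  induction w generalizing b g with
  | zero => simp [colexEnum] at hg
  | succ w ih =>
    rw [colexEnum, List.range_succ_eq_map, List.flatMap_cons] at hg
    rw [List.tail_append_of_ne_nil (by simp [colex_ne_nil])] at hg
    rw [List.mem_append] at hg
    rcases hg with hg | hg
    · rw [← List.map_tail, List.mem_map] at hg
      obtain ⟨g', hg', rfl⟩ := hg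
      have hpos := ih hg'
      have hl := (mem_colex (List.mem_of_mem_tail hg')).1
      rw [wsum_append, hl]
      simp [wsumFrom]; omega
    · rw [List.mem_flatMap] at hg
      obtain ⟨t, ht, hg⟩ := hg
      rw [List.mem_map] at ht
      obtain ⟨s, _, rfl⟩ := ht
      rw [List.mem_map] at hg
      obtain ⟨g', hg', rfl⟩ := hg
      obtain ⟨hl, h0, _⟩ := mem_colex hg'
      rw [wsum_append, hl]
      have hp : (0:Int) < (s.succ : Int) * (1 + (w:Int)) := by positivity
      simp only [wsumFrom]
      nlinarith

theorem length_colex_le (w b : Nat) : (colexEnum w b).length ≤ (b+1)^w := by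
  induction w generalizing b with
  | zero => simp [colexEnum]
  | succ w ih =>
    rw [colexEnum, List.length_flatMap]
    have hbound : ∀ x ∈ (List.range (b/(w+1) + 1)).map
        (fun t => ((colexEnum w (b - t * (w+1))).map (fun f => f ++ [(t:Int)])).length),
        x ≤ (b+1)^w := by
      intro x hx
      rw [List.mem_map] at hx
      obtain ⟨t, _, rfl⟩ := hx
      rw [List.length_map]
      calc (colexEnum w (b - t * (w+1))).length ≤ (b - t * (w+1) + 1)^w := ih _
        _ ≤ (b+1)^w := Nat.pow_le_pow_left (by omega) w
    calc _ ≤ ((List.range (b/(w+1) + 1)).map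
          (fun t => ((colexEnum w (b - t * (w+1))).map (fun f => f ++ [(t:Int)])).length)).length * (b+1)^w :=
          List.sum_le_card_nsmul _ _ hbound
      _ ≤ (b+1) * (b+1)^w := by
          apply Nat.mul_le_mul_right
          simp only [List.length_map, List.length_range]
          exact Nat.succ_le_succ (Nat.div_le_self _ _)
      _ = (b+1)^(w+1) := by rw [pow_succ]; ring

theorem incAt_stop (i : Nat) (n : Int) (L ints : List Int) (h : L.length ≤ i) :
    incrementFactorAtI i n L ints = L := by
  rw [incrementFactorAtI]; simp [h]

theorem incAt_ok (i : Nat) (n : Int) (L ints : List Int) (h : i < L.length)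
    (hle : applyFactors (L.set i (L.getD i 0 + 1)) ints ≤ n) :
    incrementFactorAtI i n L ints = L.set i (L.getD i 0 + 1) := by
  rw [incrementFactorAtI]
  rw [if_neg (by omega)]
  simp only [PySem.List.pyGetD_natCast]
  rw [if_neg (by exact not_lt.mpr hle)]

theorem incAt_carry (i : Nat) (n : Int) (L ints : List Int) (h : i < L.length)
    (hgt : applyFactors (L.set i (L.getD i 0 + 1)) ints > n) :
    incrementFactorAtI i n L ints = incrementFactorAtI (i+1) n (L.set i 0) ints := by
  rw [incrementFactorAtI]
  rw [if_neg (by omega)]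
  simp only [PySem.List.pyGetD_natCast]
  rw [if_pos hgt, List.set_set]

theorem isChain_append_of {α : Type} {R : α → α → Prop} (l1 l2 : List α)
    (h1 : List.IsChain R l1) (h2 : List.IsChain R l2)
    (hb : ∀ x, l1.getLast? = some x → ∀ y, l2.head? = some y → R x y) :
    List.IsChain R (l1 ++ l2) := by
  rcases l2 with _ | ⟨y, l2⟩
  · simpa using h1
  rcases (List.eq_nil_or_concat l1) with rfl | ⟨l1', x, rfl⟩
  · simpa using h2
  rw [List.concat_eq_append, List.append_assoc, List.singleton_append, List.isChain_split]
  refine ⟨by simpa using h1, ?_⟩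
  rw [List.isChain_cons_cons]
  exact ⟨hb x (by simp) y rfl, h2⟩

theorem countP_flatMap {α β : Type} (p : β → Bool) (f : α → List β) (l : List α) :
    (l.flatMap f).countP p = (l.map (fun a => (f a).countP p)).sum := by
  induction l with
  | nil => simp
  | cons a l ih => simp [List.flatMap_cons, List.countP_append, ih]

theorem specW_unroll (w b : Nat) :
    specW (w+1) b = ((List.range (b/(w+1) + 1)).map (fun t => specW w (b - t*(w+1)))).sum := by
  induction b using Nat.strong_induction_on with
  | _ b ih =>
    by_cases hb : b < w + 1
    · rw [Nat.div_eq_of_lt hb]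
      rw [specW, if_neg (by omega)]
      simp
    · rw [Nat.div_eq_sub_div (by omega) (by omega)]
      rw [List.range_succ_eq_map, List.map_cons, List.map_map, List.sum_cons]
      rw [specW, if_pos (by omega)]
      congr 1
      · simp
      · rw [ih (b - (w+1)) (by omega)]
        congr 1
        apply List.map_congr_left
        intro s _
        simp only [Function.comp_apply, Nat.succ_eq_add_one]
        congr 1
        rw [Nat.succ_mul]
        omega

theorem count_colex (w b : Nat) :
    (colexEnum w b).countP (fun f => wsumFrom 1 f == (b:Int)) = specW w b := by
  induction w generalizing b with
  | zero =>
    rw [colexEnum, specW]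
    rcases b with _ | b
    · simp [wsumFrom]
    · simp [List.countP_cons, wsumFrom]
      omega
  | succ w ih =>
    rw [colexEnum, countP_flatMap, specW_unroll]
    congr 1
    apply List.map_congr_left
    intro t ht
    rw [List.countP_map]
    have htM : t * (w + 1) ≤ b := by
      rw [List.mem_range] at ht
      exact (Nat.le_div_iff_mul_le (by omega)).1 (by omega)
    have hcast : ((b - t * (w+1) : Nat) : Int) = (b : Int) - (t : Int) * ((w : Int) + 1) := by
      push_cast [htM]; ring
    rw [← ih (b - t * (w+1))]
    apply List.countP_congr
    intro f hf
    obtain ⟨hl, _, _⟩ := mem_colex hf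
    simp only [Function.comp_apply, beq_iff_eq]
    rw [wsum_append, hl, hcast]
    simp only [wsumFrom]
    constructor <;> intro h <;> linarith

def stepF (n : Int) (L : List Int) : List Int := incrementFactorAtI 0 n L (oneToN n)

-- the carry step at position w: incrementing the digit of weight w+1 either
-- succeeds (t below its cap) or carries on (t at its cap)
theorem carry_ok (n : Int) (w b t : Nat) (c : List Int)
    (hlen : (w+1) + c.length = n.toNat)
    (hc : wsumFrom ((w:Int) + 2) c = n - (b:Int))
    (ht : (t+1) * (w+1) ≤ b) :
    incrementFactorAtI w n (List.replicate w 0 ++ (t:Int) :: c) (oneToN n)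
      = List.replicate w 0 ++ ((t:Int)+1) :: c := by
  set L := List.replicate w 0 ++ (t:Int) :: c with hL
  have hlenL : L.length = n.toNat := by simp [hL]; omega
  have hw : w < L.length := by simp [hL]
  have hgetD : L.getD w 0 = (t:Int) := by
    simp [hL, List.getD_eq_getElem?_getD, List.length_replicate]
  have hset : ∀ x : Int, L.set w x = List.replicate w 0 ++ x :: c := by
    intro x
    rw [hL, List.set_append_right _ _ (by simp)]
    simp
  have hwsumL : wsumFrom 1 L = (t:Int) * (1 + (w:Int)) + (n - (b:Int)) := by
    rw [hL, wsum_append, wsum_replicate_zero]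
    simp only [List.length_replicate, wsumFrom]
    have : (1:Int) + (w:Int) + 1 = (w:Int) + 2 := by ring
    rw [this, hc]
    ring
  have htot : applyFactors (L.set w (L.getD w 0 + 1)) (oneToN n) ≤ n := by
    rw [applyFactors_eq n _ (by simp [hlenL])]
    rw [wsum_set L w _ 1 hw, hgetD, hwsumL]
    have hb : ((t:Int)+1) * ((w:Int)+1) ≤ (b:Int) := by exact_mod_cast Int.ofNat_le.2 ht
    nlinarith [hb]
  rw [incAt_ok w n L (oneToN n) hw htot, hgetD, hset]

theorem carry_over (n : Int) (w b : Nat) (c : List Int)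
    (hlen : (w+1) + c.length = n.toNat)
    (hc : wsumFrom ((w:Int) + 2) c = n - (b:Int)) :
    incrementFactorAtI w n (List.replicate w 0 ++ ((b/(w+1) : Nat):Int) :: c) (oneToN n)
      = incrementFactorAtI (w+1) n (List.replicate (w+1) 0 ++ c) (oneToN n) := by
  set t := b/(w+1) with htdef
  set L := List.replicate w 0 ++ (t:Int) :: c with hL
  have hlenL : L.length = n.toNat := by simp [hL]; omega
  have hw : w < L.length := by simp [hL]
  have hgetD : L.getD w 0 = (t:Int) := by
    simp [hL, List.getD_eq_getElem?_getD, List.length_replicate]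
  have hset : ∀ x : Int, L.set w x = List.replicate w 0 ++ x :: c := by
    intro x
    rw [hL, List.set_append_right _ _ (by simp)]
    simp
  have hwsumL : wsumFrom 1 L = (t:Int) * (1 + (w:Int)) + (n - (b:Int)) := by
    rw [hL, wsum_append, wsum_replicate_zero]
    simp only [List.length_replicate, wsumFrom]
    have : (1:Int) + (w:Int) + 1 = (w:Int) + 2 := by ring
    rw [this, hc]
    ring
  have hcap : b < (t+1) * (w+1) := by
    have h1 : t * (w+1) + b % (w+1) = b := by rw [htdef, Nat.mul_comm]; exact Nat.div_add_mod b (w+1)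
    have h2 : b % (w+1) < w+1 := Nat.mod_lt _ (by omega)
    rw [Nat.succ_mul]
    omega
  have htot : applyFactors (L.set w (L.getD w 0 + 1)) (oneToN n) > n := by
    rw [applyFactors_eq n _ (by simp [hlenL])]
    rw [wsum_set L w _ 1 hw, hgetD, hwsumL]
    have hb : (b:Int) < ((t:Int)+1) * ((w:Int)+1) := by exact_mod_cast Int.ofNat_lt.2 hcap
    nlinarith [hb]
  rw [incAt_carry w n L (oneToN n) hw htot, hset]
  congr 1
  rw [List.replicate_succ' (n := w)]
  simp

theorem chain_main (n : Int) : ∀ (w b : Nat) (c : List Int),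
    w + c.length = n.toNat →
    wsumFrom ((w:Int) + 1) c = n - (b:Int) →
    List.IsChain (fun f g => stepF n (f ++ c) = g ++ c) (colexEnum w b) ∧
    (∀ lst, (colexEnum w b).getLast? = some lst →
      stepF n (lst ++ c) = incrementFactorAtI w n (List.replicate w 0 ++ c) (oneToN n)) := by
  intro w
  induction w with
  | zero =>
    intro b c hlen hc
    constructor
    · exact List.isChain_singleton _
    · intro lst hlst
      simp [colexEnum] at hlst
      subst hlst
      simp [stepF]
  | succ w ih =>
    intro b c hlen hc
    set M := b/(w+1) with hM
    set blk : Nat → List (List Int) :=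
      (fun t => (colexEnum w (b - t * (w+1))).map (fun f => f ++ [(t:Int)])) with hblk
    -- facts per block index t ≤ M
    have htM : ∀ t, t ≤ M → t * (w+1) ≤ b := by
      intro t ht
      exact (Nat.le_div_iff_mul_le (by omega)).1 ht
    have hCtx : ∀ t, t ≤ M →
        w + ((t:Int) :: c).length = n.toNat ∧
        wsumFrom ((w:Int) + 1) ((t:Int) :: c) = n - ((b - t * (w+1) : Nat):Int) := by
      intro t ht
      constructor
      · simp; omega
      · have hcast : ((b - t * (w+1) : Nat) : Int) = (b:Int) - (t:Int) * ((w:Int)+1) := by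
          push_cast [htM t ht]; ring
        rw [hcast]
        simp only [wsumFrom]
        have : (w:Int) + 1 + 1 = (w:Int) + 2 := by ring
        rw [this]
        have hc' : wsumFrom ((w:Int) + 2) c = n - (b:Int) := by
          have : ((w+1 : Nat):Int) + 1 = (w:Int) + 2 := by push_cast; ring
          rw [← this]; exact hc
        rw [hc']
        ring
    have hc2 : wsumFrom ((w:Int) + 2) c = n - (b:Int) := by
      have : ((w+1 : Nat):Int) + 1 = (w:Int) + 2 := by push_cast; ring
      rw [← this]; exact hc
    -- chain inside one block
    have hblkChain : ∀ t, t ≤ M → List.IsChain (fun f g => stepF n (f ++ c) = g ++ c) (blk t) := by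
      intro t ht
      rw [hblk]
      rw [List.isChain_map]
      have := (ih (b - t * (w+1)) ((t:Int) :: c) (hCtx t ht).1 (hCtx t ht).2).1
      apply this.imp
      intro f g h
      simpa [List.append_assoc] using h
    -- step out of the last element of block t
    have hblkLast : ∀ t, t ≤ M → ∀ lst, (blk t).getLast? = some lst →
        stepF n (lst ++ c) = incrementFactorAtI w n (List.replicate w 0 ++ (t:Int) :: c) (oneToN n) := by
      intro t ht lst hlst
      rw [hblk] at hlst
      simp only [List.getLast?_map] at hlst
      obtain ⟨lst', hlst', rfl⟩ := Option.map_eq_some_iff.1 hlst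
      have := (ih (b - t * (w+1)) ((t:Int) :: c) (hCtx t ht).1 (hCtx t ht).2).2 lst' hlst'
      simpa [List.append_assoc] using this
    have hblkHead : ∀ t, (blk t).head? = some (List.replicate w 0 ++ [(t:Int)]) := by
      intro t
      rw [hblk]
      simp [List.head?_map, colex_head]
    have hblkNe : ∀ t, blk t ≠ [] := by
      intro t h
      have := hblkHead t
      rw [h] at this; simp at this
    -- the blocks glued together, by downward induction on the number of blocks left
    have blocks : ∀ (k : Nat), ∀ (t : Nat), t + k = M + 1 →
        List.IsChain (fun f g => stepF n (f ++ c) = g ++ c) ((List.range' t k).flatMap blk) ∧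
        (∀ lst, ((List.range' t k).flatMap blk).getLast? = some lst →
          stepF n (lst ++ c) = incrementFactorAtI (w+1) n (List.replicate (w+1) 0 ++ c) (oneToN n)) ∧
        (0 < k → ((List.range' t k).flatMap blk).head? = some (List.replicate w 0 ++ [(t:Int)])) := by
      intro k
      induction k with
      | zero => intro t ht; refine ⟨by simp, by simp, by omega⟩
      | succ k ihk =>
        intro t ht
        have htM' : t ≤ M := by omega
        rw [List.range'_succ, List.flatMap_cons]
        obtain ⟨ihChain, ihLast, ihHead⟩ := ihk (t+1) (by omega)
        by_cases hk : k = 0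
        · subst hk
          have htEq : t = M := by omega
          subst htEq
          rw [List.range'_zero, List.flatMap_nil, List.append_nil]
          refine ⟨hblkChain M le_rfl, ?_, ?_⟩
          · intro lst hlst
            rw [hblkLast M le_rfl lst hlst]
            exact carry_over n w b c (by omega) hc2
          · intro _
            exact hblkHead M
        · have hkpos : 0 < k := by omega
          have hHead := ihHead hkpos
          have hRestNe : (List.range' (t+1) k).flatMap blk ≠ [] := by
            intro h; rw [h] at hHead; simp at hHead
          refine ⟨?_, ?_, ?_⟩
          · apply isChain_append_of _ _ (hblkChain t htM') ihChain
            intro x hx y hy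
            rw [hHead] at hy
            injection hy with hy
            subst hy
            have hst := hblkLast t htM' x hx
            rw [hst]
            have : t < M := by omega
            rw [carry_ok n w b t c (by omega) hc2 (htM (t+1) (by omega))]
            push_cast
            simp [List.append_assoc]
          · intro lst hlst
            rw [List.getLast?_append] at hlst
            obtain ⟨y, hy⟩ := Option.isSome_iff_exists.1 (List.getLast?_isSome.2 hRestNe)
            rw [hy] at hlst
            rw [Option.some_or] at hlst
            injection hlst with hlst
            subst hlst
            exact ihLast _ hy
          · intro _
            rw [List.head?_append, hblkHead t]
            simp
    have hfinal := blocks (M+1) 0 (by omega)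
    rw [colexEnum, List.range_eq_range']
    exact ⟨hfinal.1, hfinal.2.1⟩

theorem nwLoop_run (n : Int) (suf : List (List Int)) :
    ∀ (f : List Int) (count : Int) (fuel : Nat),
    List.IsChain (fun a b => stepF n a = b) (f :: suf) →
    (∀ g ∈ f :: suf, g.length = n.toNat) →
    stepF n ((f :: suf).getLast (List.cons_ne_nil f suf)) = List.replicate n.toNat 0 →
    (∀ g ∈ suf, 0 < wsumFrom 1 g) →
    suf.length + 1 ≤ fuel →
    nwLoop fuel n f (oneToN n) count = count + (suf.countP (fun g => wsumFrom 1 g == n) : Int) := by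
  induction suf with
  | nil =>
    intro f count fuel _ hlen hlast _ hfuel
    match fuel, hfuel with
    | fuel + 1, _ =>
      have hstep : incrementFactorAtI 0 n f (oneToN n) = List.replicate n.toNat 0 := by
        simpa [stepF] using hlast
      simp only [nwLoop, incrementFactors, hstep]
      rw [applyFactors_eq n _ (by simp)]
      rw [wsum_replicate_zero]
      simp
  | cons g suf ih =>
    intro f count fuel hch hlen hlast hpos hfuel
    match fuel, hfuel with
    | fuel + 1, hfuel =>
      rw [List.isChain_cons_cons] at hch
      obtain ⟨hfg, hch⟩ := hch
      have hstep : incrementFactorAtI 0 n f (oneToN n) = g := by simpa [stepF] using hfg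
      have hg : applyFactors g (oneToN n) = wsumFrom 1 g := by
        exact applyFactors_eq n g (hlen g (by simp))
      have hgpos : 0 < wsumFrom 1 g := hpos g (by simp)
      simp only [nwLoop, incrementFactors, hstep, hg]
      rw [if_pos (by simp only [bne_iff_ne, ne_eq]; omega)]
      have hlast2 : stepF n ((g :: suf).getLast (List.cons_ne_nil g suf))
          = List.replicate n.toNat 0 := by
        rw [← hlast]; congr 1
      rw [ih g _ fuel hch (fun x hx => hlen x (by simp [hx]))
        hlast2 (fun x hx => hpos x (by simp [hx])) (by simpa using hfuel)]
      rw [List.countP_cons]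
      push_cast
      split_ifs with h <;> omega

theorem numberOfWays_eq (n : Int) (hn : 1 ≤ n) :
    numberOfWays n = (specW n.toNat n.toNat : Int) := by
  set N := n.toNat with hN
  have hNn : (N : Int) = n := by omega
  obtain ⟨hchain, hlastP⟩ := chain_main n N N []
    (by simp [hN]) (by simp [wsumFrom]; omega)
  obtain ⟨tl, hE⟩ : ∃ tl, colexEnum N N = List.replicate N 0 :: tl := by
    have h := colex_head N N
    cases hcE : colexEnum N N with
    | nil => rw [hcE] at h; simp at h
    | cons a tl => rw [hcE] at h; simp at h; exact ⟨tl, by rw [h]⟩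
  have hchain' : List.IsChain (fun a b => stepF n a = b) (List.replicate N 0 :: tl) := by
    rw [← hE]
    apply hchain.imp
    intro a b h
    simpa using h
  have hlast' : stepF n ((List.replicate N 0 :: tl).getLast (List.cons_ne_nil _ _))
      = List.replicate N 0 := by
    have h1 : (colexEnum N N).getLast? = some ((List.replicate N 0 :: tl).getLast (List.cons_ne_nil _ _)) := by
      rw [hE, List.getLast?_eq_some_getLast]
    have := hlastP _ h1
    rw [List.append_nil] at this
    rw [this, List.append_nil]
    exact incAt_stop N n _ _ (by simp)
  have hlens : ∀ g ∈ List.replicate N 0 :: tl, g.length = N := by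
    intro g hg
    rw [← hE] at hg
    exact (mem_colex hg).1
  have hposs : ∀ g ∈ tl, 0 < wsumFrom 1 g := by
    intro g hg
    apply colex_tail_pos (w := N) (b := N)
    rw [hE]; simpa using hg
  have hfuel : tl.length + 1 ≤ (N + 1) ^ N + 1 := by
    have h1 := length_colex_le N N
    rw [hE] at h1
    simp at h1
    omega
  have hrun := nwLoop_run n tl (List.replicate N 0) 0 ((N + 1) ^ N + 1)
    hchain' hlens hlast' hposs hfuel
  have hcount : tl.countP (fun g => wsumFrom 1 g == n) = specW N N := by
    have h := count_colex N N
    rw [hE, List.countP_cons, hNn] at h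
    rw [wsum_replicate_zero] at h
    rw [if_neg (by simp; omega)] at h
    simpa using h
  rw [numberOfWays]
  show nwLoop ((N+1)^N + 1) n (List.replicate (oneToN n).length 0) (oneToN n) 0 = _
  rw [length_oneToN, ← hN, hrun, hcount]
  simp

theorem set_map_range {m i : Nat} (f : Nat → Int) (v : Int) (_h : i < m) :
    ((List.range m).map f).set i v = (List.range m).map (fun j => if j = i then v else f j) := by
  apply List.ext_getElem
  · simp
  · intro j h1 h2
    simp only [List.length_set, List.length_map, List.length_range] at h1
    rw [List.getElem_set]
    simp only [List.getElem_map, List.getElem_range]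
    by_cases hij : i = j
    · rw [if_pos hij, if_pos hij.symm]
    · rw [if_neg hij, if_neg (fun hh => hij hh.symm)]

theorem specW_lt (k j : Nat) (h : j < k + 1) : specW (k+1) j = specW k j := by
  rw [specW, if_neg (by omega), add_zero]

theorem inner_inv (n : Int) (k : Int) (hk1 : 1 ≤ k) (hkn : k ≤ n) :
    ∀ (m : Nat) (j0 : Int), (n+1-j0).toNat = m → k ≤ j0 → j0 ≤ n+1 →
    (PySem.List.pyRange j0 (n+1) 1).foldl
      (fun ways j => PySem.List.pySetD ways j
        (PySem.List.pyGetD ways j 0 + PySem.List.pyGetD ways (j-k) 0))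
      ((List.range (n.toNat+1)).map
        (fun (j:Nat) => if (j:Int) < j0 then (specW k.toNat j : Int) else (specW (k.toNat-1) j : Int)))
    = (List.range (n.toNat+1)).map (fun j => (specW k.toNat j : Int)) := by
  intro m
  induction m with
  | zero =>
    intro j0 hm _ hub
    have hj0 : j0 = n + 1 := by omega
    subst hj0
    rw [PySem.List.pyRange_one_eq_nil (by omega), List.foldl_nil]
    apply List.map_congr_left
    intro j hj
    rw [List.mem_range] at hj
    rw [if_pos (by omega)]
  | succ m ihm =>
    intro j0 hm hlb hub
    have hj0 : j0 < n + 1 := by omega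
    rw [PySem.List.pyRange_one_cons hj0, List.foldl_cons]
    have hjt : j0.toNat < n.toNat + 1 := by omega
    have hjkt : (j0 - k).toNat < n.toNat + 1 := by omega
    have hg1 : PySem.List.pyGetD ((List.range (n.toNat+1)).map
        (fun (j:Nat) => if (j:Int) < j0 then (specW k.toNat j : Int) else (specW (k.toNat-1) j : Int))) j0 0
        = (specW (k.toNat-1) j0.toNat : Int) := by
      rw [PySem.List.pyGetD_eq_getElem _ _ (by omega) (by simp only [List.length_map, List.length_range]; omega)]
      simp only [List.getElem_map, List.getElem_range]
      rw [if_neg (by omega)]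
    have hg2 : PySem.List.pyGetD ((List.range (n.toNat+1)).map
        (fun (j:Nat) => if (j:Int) < j0 then (specW k.toNat j : Int) else (specW (k.toNat-1) j : Int))) (j0-k) 0
        = (specW k.toNat (j0-k).toNat : Int) := by
      rw [PySem.List.pyGetD_eq_getElem _ _ (by omega) (by simp only [List.length_map, List.length_range]; omega)]
      simp only [List.getElem_map, List.getElem_range]
      rw [if_pos (by omega)]
    rw [hg1, hg2]
    rw [PySem.List.pySetD_of_nonneg _ _ (by omega)]
    rw [set_map_range _ _ hjt]
    have hstate : (List.range (n.toNat+1)).map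
        (fun (j:Nat) => if j = j0.toNat then (specW (k.toNat-1) j0.toNat : Int) + (specW k.toNat (j0-k).toNat : Int)
          else if (j:Int) < j0 then (specW k.toNat j : Int) else (specW (k.toNat-1) j : Int))
        = (List.range (n.toNat+1)).map
        (fun (j:Nat) => if (j:Int) < j0+1 then (specW k.toNat j : Int) else (specW (k.toNat-1) j : Int)) := by
      apply List.map_congr_left
      intro j hj
      rw [List.mem_range] at hj
      by_cases hcase : j = j0.toNat
      · subst hcase
        rw [if_pos rfl, if_pos (by omega)]
        obtain ⟨kk, hkk⟩ : ∃ kk, k.toNat = kk + 1 := ⟨k.toNat - 1, by omega⟩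
        have h1 : (j0 - k).toNat = j0.toNat - (kk+1) := by omega
        rw [hkk, h1, show kk + 1 - 1 = kk from rfl]
        conv_rhs => rw [specW]
        rw [if_pos (by omega)]
        push_cast
        ring
      · rw [if_neg hcase]
        by_cases hcase2 : (j:Int) < j0
        · rw [if_pos hcase2, if_pos (by omega)]
        · rw [if_neg hcase2, if_neg (by omega)]
    rw [hstate]
    exact ihm (j0+1) (by omega) (by omega) (by omega)

theorem outer_inv (n : Int) :
    ∀ (m : Nat) (k0 : Int), (n+1-k0).toNat = m → 1 ≤ k0 → k0 ≤ n+1 →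
    (PySem.List.pyRange k0 (n+1) 1).foldl
      (fun ways k => (PySem.List.pyRange k (n+1) 1).foldl
        (fun ways j => PySem.List.pySetD ways j
          (PySem.List.pyGetD ways j 0 + PySem.List.pyGetD ways (j-k) 0)) ways)
      ((List.range (n.toNat+1)).map (fun j => (specW (k0.toNat - 1) j : Int)))
    = (List.range (n.toNat+1)).map (fun j => (specW n.toNat j : Int)) := by
  intro m
  induction m with
  | zero =>
    intro k0 hm _ hub
    have hk0 : k0 = n + 1 := by omega
    subst hk0
    rw [PySem.List.pyRange_one_eq_nil (by omega), List.foldl_nil]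
    apply List.map_congr_left
    intro j _
    congr 2
    omega
  | succ m ihm =>
    intro k0 hm hlb hub
    have hk0 : k0 < n + 1 := by omega
    rw [PySem.List.pyRange_one_cons hk0, List.foldl_cons]
    have hstart : (List.range (n.toNat+1)).map (fun j => (specW (k0.toNat - 1) j : Int))
        = (List.range (n.toNat+1)).map
          (fun (j:Nat) => if (j:Int) < k0 then (specW k0.toNat j : Int) else (specW (k0.toNat-1) j : Int)) := by
      apply List.map_congr_left
      intro j hj
      by_cases hcase : (j:Int) < k0
      · rw [if_pos hcase]
        obtain ⟨kk, hkk⟩ : ∃ kk, k0.toNat = kk + 1 := ⟨k0.toNat - 1, by omega⟩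
        rw [hkk, specW_lt kk j (by omega), show kk + 1 - 1 = kk from rfl]
      · rw [if_neg hcase]
    rw [hstart, inner_inv n k0 (by omega) (by omega) (n+1-k0).toNat k0 rfl (by omega) (by omega)]
    have := ihm (k0+1) (by omega) (by omega) (by omega)
    rw [show ((k0+1).toNat - 1) = k0.toNat by omega] at this
    exact this

theorem countPartitions_eq (n : Int) (hn : 1 ≤ n) :
    countPartitions n = (specW n.toNat n.toNat : Int) := by
  rw [countPartitions]
  have hinit : PySem.List.pySetD (List.replicate (n + 1).toNat (0:Int)) 0 1
      = (List.range (n.toNat+1)).map (fun j => (specW 0 j : Int)) := by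
    rw [PySem.List.pySetD_of_nonneg _ _ (by omega)]
    rw [show (n+1).toNat = n.toNat + 1 by omega]
    apply List.ext_getElem
    · simp
    · intro j h1 h2
      simp only [List.length_set, List.length_replicate] at h1
      rw [List.getElem_set]
      simp only [List.getElem_replicate, List.getElem_map, List.getElem_range]
      rw [specW]
      split_ifs <;> simp_all
  rw [hinit]
  have hout := outer_inv n (n+1-1).toNat 1 (by omega) (by omega) (by omega)
  rw [show ((1:Int).toNat - 1) = 0 from rfl] at hout
  rw [hout]
  rw [PySem.List.pyGetD_eq_getElem _ _ (by omega) (by simp only [List.length_map, List.length_range]; omega)]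
  simp only [List.getElem_map, List.getElem_range]

theorem core_eq (n : Int) (hn : 1 ≤ n) : numberOfWays n = countPartitions n := by
  rw [numberOfWays_eq n hn, countPartitions_eq n hn]

theorem loops_eq (max : Int) : ∀ (m : Nat) (a : Int), (max + 1 - a).toNat = m → 1 ≤ a →
    ∀ acc, gpLoop (PySem.List.pyRange a (max+1) 1) max acc = gpAltLoop a max acc := by
  intro m
  induction m with
  | zero =>
    intro a hm ha acc
    rw [PySem.List.pyRange_one_eq_nil (by omega)]
    rw [gpAltLoop, if_neg (by omega)]
    rfl
  | succ m ih =>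
    intro a hm ha acc
    rw [PySem.List.pyRange_one_cons (by omega)]
    rw [gpAltLoop, if_pos (by omega)]
    simp only [gpLoop]
    rw [if_neg (by omega), core_eq a ha]
    by_cases hbig : countPartitions a > max
    · rw [if_pos hbig, if_pos hbig]
    · rw [if_neg hbig, if_neg hbig]
      exact ih (a+1) (by omega) (by omega) (acc ++ [countPartitions a])

-- ===== VERDICT (by name: the statement is the Claim_ definition above) =====
theorem generate_partitions_spec : Claim_equal_generate_partitions := by
  intro max _ hpre
  unfold Spec_generate_partitions generate_partitions generate_partitions_alt
  have hmax : ¬ max ≤ 0 := by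
    unfold Pre_generate_partitions at hpre; omega
  rw [if_neg hmax, if_neg hmax]
  rw [PySem.List.pyRange_one_cons (by omega)]
  simp only [gpLoop]
  rw [if_pos (by omega)]
  exact loops_eq max (max + 1 - 1).toNat 1 rfl (by omega) []
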